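-- pv_equiv track=rewrite | github.com/zli213/DocSense | FastAPI/main.py | extract_security_level
-- ===== SOURCE A (Python) =====
-- topic_tags = ["medical", "it", "hr", "support", "legal", "financial"]
--
-- security_levels = ["G0", "G1", "S0", "S1", "S2", "S3"]
--
-- def extract_security_level(path_parts):
--     security_level = "G0"
--     for part in path_parts:
--         if part in security_levels:
--             return part
--         elif part in topic_tags:
--             security_level = "G1"
--     return security_level
-- ===== SOURCE B (Python) =====
-- topic_tags = ["medical", "it", "hr", "support", "legal", "financial"]
--
-- security_levels = ["G0", "G1", "S0", "S1", "S2", "S3"]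
--
-- def extract_security_level(path_parts):
--     parts = list(path_parts)
--     first = next((p for p in parts if p in security_levels), None)
--     if first is not None:
--         return first
--     return "G1" if any(p in topic_tags for p in parts) else "G0"
-- ===== Notes on version B (the rewrite author's own statement) =====
-- stated objective: idiomatic
-- what changed: Replaces the fused single loop with accumulator by two separate passes: a find-first over security levels, then an existence check over topic tags.
import Mathlib
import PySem

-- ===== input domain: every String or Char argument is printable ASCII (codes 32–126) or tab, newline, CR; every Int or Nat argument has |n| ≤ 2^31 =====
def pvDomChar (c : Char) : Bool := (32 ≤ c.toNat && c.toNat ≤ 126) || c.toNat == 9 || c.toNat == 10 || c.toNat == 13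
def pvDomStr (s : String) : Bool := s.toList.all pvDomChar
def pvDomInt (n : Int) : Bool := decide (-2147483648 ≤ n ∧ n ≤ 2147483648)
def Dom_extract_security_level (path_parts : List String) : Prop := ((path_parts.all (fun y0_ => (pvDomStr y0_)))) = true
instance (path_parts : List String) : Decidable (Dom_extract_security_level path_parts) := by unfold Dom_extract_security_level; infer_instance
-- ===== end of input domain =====

-- B replaces A's single fused loop-with-accumulator by two separate passes (find-first security level, then an any-check over topic tags); objective: idiomatic.


def topic_tags : List String := ["medical", "it", "hr", "support", "legal", "financial"]

def security_levels : List String := ["G0", "G1", "S0", "S1", "S2", "S3"]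

-- ===== PORT A =====
-- A's loop: returns the first part that is a security level; otherwise tracks the
-- accumulator security_level ("G0" → "G1" once a topic tag is seen) and returns it.
def extract_security_level_loop (security_level : String) : List String → String
  | [] => security_level
  | part :: rest =>
    if security_levels.contains part then part
    else if topic_tags.contains part then extract_security_level_loop "G1" rest
    else extract_security_level_loop security_level rest

def extract_security_level (path_parts : List String) : String :=
  extract_security_level_loop "G0" path_parts

-- ===== PORT B =====
def extract_security_level_alt (path_parts : List String) : String :=
  match path_parts.find? (fun p => security_levels.contains p) with
  | some first => first
  | none => if path_parts.any (fun p => topic_tags.contains p) then "G1" else "G0"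

-- ===== PRECONDITION & SPEC =====
def Spec_extract_security_level (path_parts : List String) (out : String) : Prop := out = extract_security_level_alt path_parts
instance (path_parts : List String) (out : String) : Decidable (Spec_extract_security_level path_parts out) := by unfold Spec_extract_security_level; infer_instance

-- ===== CLAIM (what is proved, stated in full; the proofs are below) =====
def Claim_equal_extract_security_level : Prop := ∀ (path_parts : List String), Dom_extract_security_level path_parts → Spec_extract_security_level path_parts (extract_security_level path_parts)

-- ===== LEMMAS AND PROOFS =====

-- Loop invariant: with accumulator acc ∈ {"G0","G1"}, A's loop computes B's two-pass answer,
-- where acc = "G1" absorbs the any-check over the remaining list.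
theorem extract_security_level_loop_eq (l : List String) (acc : String)
    (hacc : acc = "G0" ∨ acc = "G1") :
    extract_security_level_loop acc l =
      (match l.find? (fun p => security_levels.contains p) with
       | some first => first
       | none => if acc = "G1" ∨ l.any (fun p => topic_tags.contains p) then "G1" else acc) := by
  induction l generalizing acc with
  | nil =>
    rcases hacc with h | h <;> simp [extract_security_level_loop, h]
  | cons part rest ih =>
    by_cases hs : part ∈ security_levels
    · simp [extract_security_level_loop, hs]
    · rw [List.find?_cons_of_neg (by simpa using hs)]
      by_cases ht : part ∈ topic_tags
      · rw [show extract_security_level_loop acc (part :: rest) = extract_security_level_loop "G1" rest by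
            simp [extract_security_level_loop, hs, ht],
          ih "G1" (Or.inr rfl)]
        cases rest.find? (fun p => security_levels.contains p) <;> simp [ht]
      · rw [show extract_security_level_loop acc (part :: rest) = extract_security_level_loop acc rest by
            simp [extract_security_level_loop, hs, ht],
          ih acc hacc]
        cases rest.find? (fun p => security_levels.contains p) <;> simp [ht]

-- ===== VERDICT (by name: the statement is the Claim_ definition above) =====
theorem extract_security_level_spec : Claim_equal_extract_security_level := by
  intro path_parts _
  unfold Spec_extract_security_level extract_security_level extract_security_level_alt
  rw [extract_security_level_loop_eq path_parts "G0" (Or.inl rfl)]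
  cases h : path_parts.find? (fun p => security_levels.contains p) <;> simp
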